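-- pv_equiv track=rewrite | github.com/Raiffeisen-DGTL/CodeOwners | CI_scripts/sharedCodeOwners.py | get_teams_owners_and_unowned_paths
-- ===== SOURCE A (Python) =====
-- def get_teams_owners_and_unowned_paths(diff_paths, codeowners_paths):
--     """Соотносит измененные файлы с командами, указанными в CODEOWNERS, и возвращает список команд,
--     ответственных за файлы, а также список файлов, для которых команды не найдены.
--     """
--     found_teams = set()
--     not_found_paths = []
--     for path in diff_paths:
--         components = path.split('/')
--         team_found = False
--         for owner_path in codeowners_paths.keys():
--             owner_path_items = owner_path[1:].split('/')
--             for module_item, owner_item in zip(components, owner_path_items):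
--                 if module_item != owner_item:
--                     break
--             else:
--                 found_teams.update(codeowners_paths[owner_path])
--                 team_found = True
--                 break
--         if not team_found:
--             not_found_paths.append(path)
--     return found_teams, not_found_paths
-- ===== SOURCE B (Python) =====
-- def get_teams_owners_and_unowned_paths(diff_paths, codeowners_paths):
--     """Flattened-trie rewrite: index codeowners component-prefixes in two hash maps
--     (first-insertion index), so each diff path is matched in O(len(path)^2) dict work
--     instead of scanning every codeowners entry."""
--     items_list = [op[1:].split('/') for op in codeowners_paths]
--     vals = list(codeowners_paths.values())
--     end_idx = {}   # components tuple of an owner -> first insertion index ending there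
--     ext_min = {}   # prefix tuple -> first insertion index of an owner extending it
--     for i, items in enumerate(items_list):
--         end_idx.setdefault(tuple(items), i)
--     for i, items in enumerate(items_list):
--         for k in range(len(items) + 1):
--             ext_min.setdefault(tuple(items[:k]), i)
--     found_teams = set()
--     not_found_paths = []
--     for path in diff_paths:
--         comps = path.split('/')
--         cands = [end_idx.get(tuple(comps[:k])) for k in range(len(comps))]
--         cands.append(ext_min.get(tuple(comps)))
--         best = None
--         for j in cands:
--             if j is not None and (best is None or j < best):
--                 best = j
--         if best is None:
--             not_found_paths.append(path)
--         else:
--             found_teams.update(vals[best])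
--     return found_teams, not_found_paths
-- ===== Notes on version B (the rewrite author's own statement) =====
-- stated objective: faster
-- what changed: Instead of scanning every codeowners entry for every diff path, B builds two hash maps over codeowners component-prefixes (owner-components tuple -> first insertion index, and prefix tuple -> minimal insertion index of an owner extending it) once, and resolves each diff path by dictionary lookups on its own prefixes, taking the minimal insertion index as the first-matching owner.
import Mathlib
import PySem

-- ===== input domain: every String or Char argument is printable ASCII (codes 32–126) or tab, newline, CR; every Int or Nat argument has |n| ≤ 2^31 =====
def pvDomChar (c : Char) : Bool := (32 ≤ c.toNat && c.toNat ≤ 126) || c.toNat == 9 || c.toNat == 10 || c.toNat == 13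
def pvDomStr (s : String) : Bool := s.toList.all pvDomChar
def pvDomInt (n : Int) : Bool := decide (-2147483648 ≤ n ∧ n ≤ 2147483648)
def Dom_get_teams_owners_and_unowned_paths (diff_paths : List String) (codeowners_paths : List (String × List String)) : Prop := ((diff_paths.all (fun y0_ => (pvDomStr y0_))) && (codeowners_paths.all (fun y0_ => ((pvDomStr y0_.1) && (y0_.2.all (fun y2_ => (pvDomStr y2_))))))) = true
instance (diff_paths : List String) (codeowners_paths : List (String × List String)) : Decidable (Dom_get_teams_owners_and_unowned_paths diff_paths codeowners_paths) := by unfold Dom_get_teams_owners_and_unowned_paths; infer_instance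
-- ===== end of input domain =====

-- B replaces A's per-path scan over all codeowners entries by two hash maps over
-- codeowners component-prefixes (first-insertion index), built once; objective: faster.

-- ===== PORT A =====
-- path.split('/')  ('/' ≠ "", so split? always returns a value)
def pvSplitSlash (s : String) : List String := (PySem.Str.split? s "/").getD []
-- owner_path[1:].split('/')  (shared text of both Pythons)
def pvOwnerItems (op : String) : List String := pvSplitSlash (PySem.Str.slice op (some 1) none)

-- inner 'for … in zip(…): if …: break / else:' — true iff all zipped pairs equal
def pvZipMatch : List String → List String → Bool
  | m :: ms, o :: os => if m != o then false else pvZipMatch ms os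
  | _, _ => true

-- scan of codeowners_paths.keys(): first key whose items zip-match the components
def pvFindOwner (comps : List String) : List String → Option String
  | [] => none
  | op :: rest => if pvZipMatch comps (pvOwnerItems op) then some op else pvFindOwner comps rest

def get_teams_owners_and_unowned_paths (diff_paths : List String) (codeowners_paths : List (String × List String)) : List String × List String :=
  let d := PySem.Dict.ofList codeowners_paths
  diff_paths.foldl (fun st path =>
    let comps := pvSplitSlash path
    match pvFindOwner comps d.keys with
    -- codeowners_paths[owner_path]: the key comes from d.keys, so the lookup never raises
    | some op => (PySem.Set.update st.1 (d.getD op []), st.2)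
    | none => (st.1, st.2 ++ [path])) (PySem.Set.empty, [])

-- ===== PORT B =====
def get_teams_owners_and_unowned_paths_alt (diff_paths : List String) (codeowners_paths : List (String × List String)) : List String × List String :=
  let d := PySem.Dict.ofList codeowners_paths
  let itemsList := d.keys.map pvOwnerItems
  let vals := d.values
  let endIdx := (PySem.List.enumerate itemsList).foldl
    (fun dd p => dd.setdefault p.2 p.1) (PySem.Dict.empty : PySem.Dict (List String) Int)
  let extMin := (PySem.List.enumerate itemsList).foldl
    (fun dd p =>
      ((PySem.List.pyRange 0 (PySem.List.len p.2 + 1)).map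
          (fun k => PySem.List.slice p.2 none (some k))).foldl
        (fun dd q => dd.setdefault q p.1) dd)
    (PySem.Dict.empty : PySem.Dict (List String) Int)
  diff_paths.foldl (fun st path =>
    let comps := pvSplitSlash path
    let cands := ((PySem.List.pyRange 0 (PySem.List.len comps)).map
        (fun k => endIdx.get? (PySem.List.slice comps none (some k)))) ++ [extMin.get? comps]
    let best := cands.foldl (fun best j =>
      match j with
      | none => best
      | some jv => match best with
        | none => some jv
        | some bv => if jv < bv then some jv else best) none
    match best with
    -- vals[best]: best is an in-range index by construction
    | some i => (PySem.Set.update st.1 (PySem.List.pyGetD vals i []), st.2)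
    | none => (st.1, st.2 ++ [path])) (PySem.Set.empty, [])

-- ===== PRECONDITION & SPEC =====
def Spec_get_teams_owners_and_unowned_paths (diff_paths : List String) (codeowners_paths : List (String × List String)) (out : List String × List String) : Prop := out = get_teams_owners_and_unowned_paths_alt diff_paths codeowners_paths
instance (diff_paths : List String) (codeowners_paths : List (String × List String)) (out : List String × List String) : Decidable (Spec_get_teams_owners_and_unowned_paths diff_paths codeowners_paths out) := by unfold Spec_get_teams_owners_and_unowned_paths; infer_instance

-- ===== CLAIM (what is proved, stated in full; the proofs are below) =====
def Claim_equal_get_teams_owners_and_unowned_paths : Prop := ∀ (diff_paths : List String) (codeowners_paths : List (String × List String)), Dom_get_teams_owners_and_unowned_paths diff_paths codeowners_paths → Spec_get_teams_owners_and_unowned_paths diff_paths codeowners_paths (get_teams_owners_and_unowned_paths diff_paths codeowners_paths)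

-- ===== LEMMAS AND PROOFS =====

-- zip-match is "one side is a prefix of the other"
theorem pvZipMatch_iff (a b : List String) : pvZipMatch a b = true ↔ b <+: a ∨ a <+: b := by
  induction a generalizing b with
  | nil =>
    cases b <;> simp [pvZipMatch]
  | cons m ms ih =>
    cases b with
    | nil => simp [pvZipMatch]
    | cons o os =>
      by_cases h : m = o
      · subst h
        simp [pvZipMatch, ih, List.cons_prefix_cons]
      · simp [pvZipMatch, bne, h, List.cons_prefix_cons, Ne.symm h]

-- A's scan returns the element at the first matching index
theorem pvFindOwner_eq (comps : List String) (ks : List String) :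
    pvFindOwner comps ks = ks[ks.findIdx (fun k => pvZipMatch comps (pvOwnerItems k))]? := by
  induction ks with
  | nil => simp [pvFindOwner]
  | cons k rest ih =>
    by_cases h : pvZipMatch comps (pvOwnerItems k) = true
    · simp [pvFindOwner, h, List.findIdx_cons]
    · simp only [pvFindOwner, h, ih, List.findIdx_cons]
      simp

-- the option-minimum step of B's best-candidate loop
def pvOMin (best j : Option Int) : Option Int :=
  match j with
  | none => best
  | some jv => match best with
    | none => some jv
    | some bv => if jv < bv then some jv else best

-- "first index in l satisfying p, as an Option Int" — what B's hash maps store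
def pvG (l : List (List String)) (p : List String → Bool) : Option Int :=
  if l.findIdx p < l.length then some ((l.findIdx p : Nat) : Int) else none

theorem findIdx_or_min {α} (p q : α → Bool) (l : List α) :
    l.findIdx (fun x => p x || q x) = min (l.findIdx p) (l.findIdx q) := by
  induction l with
  | nil => simp
  | cons x xs ih =>
    simp only [List.findIdx_cons]
    cases hp : p x <;> cases hq : q x <;>
      simp only [Bool.false_or, Bool.or_self, Bool.or_false,
        cond_true, cond_false, ih] <;> omega

theorem pvOMin_none (o : Option Int) : pvOMin none o = o := by cases o <;> rfl

theorem pvOMin_g (l : List (List String)) (p q : List String → Bool) :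
    pvOMin (pvG l p) (pvG l q) = pvG l (fun x => p x || q x) := by
  unfold pvG
  rw [findIdx_or_min]
  rcases Nat.lt_or_ge (l.findIdx p) l.length with hp | hp <;>
    rcases Nat.lt_or_ge (l.findIdx q) l.length with hq | hq
  · rw [if_pos hp, if_pos hq, if_pos (by omega)]
    simp only [pvOMin]
    split_ifs with h <;> (congr 1; push_cast; omega)
  · rw [if_pos hp, if_neg (by omega), if_pos (by omega)]
    simp only [pvOMin]
    congr 1; push_cast; omega
  · rw [if_neg (by omega), if_pos hq, if_pos (by omega)]
    simp only [pvOMin]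
    congr 1; push_cast; omega
  · rw [if_neg (by omega), if_neg (by omega), if_neg (by omega)]
    rfl

theorem findIdx_false {α} (l : List α) : l.findIdx (fun _ => false) = l.length := by
  induction l with
  | nil => rfl
  | cons x xs ih => simp [List.findIdx_cons, ih]

theorem foldl_pvOMin_map_aux (l : List (List String)) (ps : List (List String → Bool))
    (p0 : List String → Bool) :
    (ps.map (pvG l)).foldl pvOMin (pvG l p0) = pvG l (fun x => p0 x || ps.any (fun p => p x)) := by
  induction ps generalizing p0 with
  | nil => simp
  | cons p1 rest ih =>
    simp only [List.map_cons, List.foldl_cons]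
    rw [pvOMin_g, ih]
    congr 1
    funext x
    simp [Bool.or_assoc]

theorem foldl_pvOMin_map (l : List (List String)) (ps : List (List String → Bool)) :
    (ps.map (pvG l)).foldl pvOMin none = pvG l (fun x => ps.any (fun p => p x)) := by
  cases ps with
  | nil => simp [pvG, findIdx_false]
  | cons p0 rest =>
    simp only [List.map_cons, List.foldl_cons, pvOMin_none]
    rw [foldl_pvOMin_map_aux]
    rfl

-- a single setdefault, seen through get?
theorem setdefault_get?_or (d : PySem.Dict (List String) Int) (x t : List String) (i : Int) :
    (d.setdefault x i).get? t = (d.get? t).or (if x == t then some i else none) := by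
  by_cases h : t = x
  · subst h
    rw [PySem.Dict.get?_setdefault_self]
    cases d.get? t <;> simp
  · rw [PySem.Dict.get?_setdefault_of_ne d i h]
    have hb : (x == t) = false := by simpa using Ne.symm h
    simp [hb]

-- setdefault over a key list with a single value, seen through get?
theorem setdefault_list_get?_or (ks : List (List String)) (i : Int)
    (d : PySem.Dict (List String) Int) (t : List String) :
    ((ks.foldl (fun dd q => dd.setdefault q i) d).get? t)
      = (d.get? t).or (if ks.contains t then some i else none) := by
  induction ks generalizing d with
  | nil => simp
  | cons q ks ih =>
    simp only [List.foldl_cons, ih, setdefault_get?_or]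
    rw [Option.or_assoc]
    congr 1
    by_cases h1 : t = q
    · subst h1
      simp
    · have hb : (q == t) = false := by simpa using Ne.symm h1
      simp [hb, h1]

-- generic characterisation of B's enumerate-setdefault dict-building loops
theorem get?_enum_foldl {α : Type}
    (u : PySem.Dict (List String) Int → Int → α → PySem.Dict (List String) Int)
    (c : List String → α → Bool)
    (H : ∀ d i x t, (u d i x).get? t = ((d.get? t).or (if c t x then some i else none)))
    (l : List α) (s : Int) (d0 : PySem.Dict (List String) Int) (t : List String) :
    (((PySem.List.enumerate l s).foldl (fun d p => u d p.1 p.2) d0).get? t)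
      = (d0.get? t).or
          (if l.findIdx (c t) < l.length then some (s + (l.findIdx (c t) : Nat)) else none) := by
  induction l generalizing s d0 with
  | nil => simp [PySem.List.enumerate_nil]
  | cons x xs ih =>
    rw [PySem.List.enumerate_cons]
    simp only [List.foldl_cons]
    rw [ih, H, Option.or_assoc]
    congr 1
    cases hc : c t x with
    | true =>
      simp [List.findIdx_cons, hc]
    | false =>
      rw [if_neg (by simp), Option.none_or]
      simp only [List.findIdx_cons, hc, cond_false, List.length_cons]
      by_cases h : xs.findIdx (c t) < xs.length
      · rw [if_pos h, if_pos (by omega)]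
        congr 1
        push_cast
        ring
      · rw [if_neg h, if_neg (by omega)]

-- the prefix list [tuple(items[:k]) for k in range(len(items)+1)]
theorem prefList_eq (x : List String) :
    ((PySem.List.pyRange 0 (PySem.List.len x + 1)).map (fun k => PySem.List.slice x none (some k)))
      = (List.range (x.length + 1)).map (fun k => x.take k) := by
  have h : PySem.List.len x + 1 = ((x.length + 1 : Nat) : Int) := by
    simp [PySem.List.len_eq]
  rw [h, PySem.List.pyRange_zero, List.map_map]
  simp [Function.comp, PySem.List.slice_to_natCast]

theorem mem_takes_iff (x t : List String) :
    ((List.range (x.length + 1)).map (fun k => x.take k)).contains t = decide (t <+: x) := by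
  rw [Bool.eq_iff_iff, List.contains_iff_mem, decide_eq_true_iff]
  simp only [List.mem_map, List.mem_range]
  constructor
  · rintro ⟨k, _, rfl⟩
    exact List.take_prefix k x
  · intro h
    exact ⟨t.length, by have := h.length_le; omega, (List.prefix_iff_eq_take.mp h).symm⟩

-- the disjunction of B's candidate predicates is exactly A's zip-match
theorem any_preds_eq (comps x : List String) :
    (((List.range comps.length).map (fun k (y : List String) => y == comps.take k))
        ++ [fun y : List String => decide (comps <+: y)]).any (fun p => p x)
      = pvZipMatch comps x := by
  rw [Bool.eq_iff_iff, pvZipMatch_iff]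
  simp only [List.any_append, List.any_map, List.any_cons, List.any_nil, Bool.or_false,
    Bool.or_eq_true, List.any_eq_true, List.mem_range, Function.comp, beq_iff_eq,
    decide_eq_true_iff]
  constructor
  · rintro (⟨k, hk, rfl⟩ | h)
    · exact Or.inl (List.take_prefix k comps)
    · exact Or.inr h
  · rintro (h | h)
    · by_cases hl : x.length = comps.length
      · exact Or.inr (h.eq_of_length hl ▸ List.prefix_refl x)
      · exact Or.inl ⟨x.length, by have := h.length_le; omega, List.prefix_iff_eq_take.mp h⟩
    · exact Or.inr h

-- the per-path core: B's best candidate is the first zip-matching index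
theorem best_eq (itemsList : List (List String)) (comps : List String) :
    ((((PySem.List.pyRange 0 (PySem.List.len comps)).map
        (fun k => ((PySem.List.enumerate itemsList).foldl
            (fun dd p => dd.setdefault p.2 p.1)
            (PySem.Dict.empty : PySem.Dict (List String) Int)).get?
          (PySem.List.slice comps none (some k)))) ++
      [((PySem.List.enumerate itemsList).foldl
          (fun dd p =>
            ((PySem.List.pyRange 0 (PySem.List.len p.2 + 1)).map
                (fun k => PySem.List.slice p.2 none (some k))).foldl
              (fun dd q => dd.setdefault q p.1) dd)
          (PySem.Dict.empty : PySem.Dict (List String) Int)).get? comps]).foldl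
      (fun best j =>
        match j with
        | none => best
        | some jv => match best with
          | none => some jv
          | some bv => if jv < bv then some jv else best) none)
    = pvG itemsList (fun x => pvZipMatch comps x) := by
  have hEnd : ∀ t, ((PySem.List.enumerate itemsList).foldl
      (fun dd p => dd.setdefault p.2 p.1) (PySem.Dict.empty : PySem.Dict (List String) Int)).get? t
      = pvG itemsList (fun x => x == t) := by
    intro t
    rw [get?_enum_foldl (fun d i x => d.setdefault x i) (fun t x => x == t)
      (fun d i x t => setdefault_get?_or d x t i) itemsList 0 _ t]
    simp [pvG]
  have hExt : ∀ t, ((PySem.List.enumerate itemsList).foldl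
      (fun dd p =>
        ((PySem.List.pyRange 0 (PySem.List.len p.2 + 1)).map
            (fun k => PySem.List.slice p.2 none (some k))).foldl
          (fun dd q => dd.setdefault q p.1) dd)
      (PySem.Dict.empty : PySem.Dict (List String) Int)).get? t
      = pvG itemsList (fun x => decide (t <+: x)) := by
    intro t
    rw [get?_enum_foldl
      (fun d i x => ((PySem.List.pyRange 0 (PySem.List.len x + 1)).map
          (fun k => PySem.List.slice x none (some k))).foldl (fun dd q => dd.setdefault q i) d)
      (fun t x => decide (t <+: x))
      (fun d i x t => by rw [setdefault_list_get?_or, prefList_eq, mem_takes_iff])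
      itemsList 0 _ t]
    simp [pvG]
  have hcands : (((PySem.List.pyRange 0 (PySem.List.len comps)).map
      (fun k => ((PySem.List.enumerate itemsList).foldl
        (fun dd p => dd.setdefault p.2 p.1) (PySem.Dict.empty : PySem.Dict (List String) Int)).get?
          (PySem.List.slice comps none (some k)))) ++ [((PySem.List.enumerate itemsList).foldl
      (fun dd p =>
        ((PySem.List.pyRange 0 (PySem.List.len p.2 + 1)).map
            (fun k => PySem.List.slice p.2 none (some k))).foldl
          (fun dd q => dd.setdefault q p.1) dd)
      (PySem.Dict.empty : PySem.Dict (List String) Int)).get? comps])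
      = (((List.range comps.length).map (fun k (y : List String) => y == comps.take k))
          ++ [fun y : List String => decide (comps <+: y)]).map (pvG itemsList) := by
    rw [List.map_append]
    congr 1
    · have h : PySem.List.len comps = ((comps.length : Nat) : Int) := by
        simp [PySem.List.len_eq]
      rw [h, PySem.List.pyRange_zero]
      simp only [Int.toNat_natCast, List.map_map]
      apply List.map_congr_left
      intro k _
      simp only [Function.comp, PySem.List.slice_to_natCast]
      exact hEnd (comps.take k)
    · simp only [List.map_cons, List.map_nil]
      congr 1
      exact hExt comps
  rw [hcands]
  rw [show (fun (best j : Option Int) =>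
        match j with
        | none => best
        | some jv => match best with
          | none => some jv
          | some bv => if jv < bv then some jv else best) = pvOMin from rfl]
  rw [foldl_pvOMin_map]
  congr 1
  funext x
  exact any_preds_eq comps x

-- per-path step equality of the two folds
theorem step_eq (d : PySem.Dict String (List String)) (hnd : d.keys.Nodup)
    (st : PySem.Set String × List String) (path : String) :
    (match pvFindOwner (pvSplitSlash path) d.keys with
     | some op => (PySem.Set.update st.1 (d.getD op []), st.2)
     | none => (st.1, st.2 ++ [path]))
    = (match ((((PySem.List.pyRange 0 (PySem.List.len (pvSplitSlash path))).map
          (fun k => ((PySem.List.enumerate (d.keys.map pvOwnerItems)).foldl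
              (fun dd p => dd.setdefault p.2 p.1)
              (PySem.Dict.empty : PySem.Dict (List String) Int)).get?
            (PySem.List.slice (pvSplitSlash path) none (some k)))) ++
        [((PySem.List.enumerate (d.keys.map pvOwnerItems)).foldl
            (fun dd p =>
              ((PySem.List.pyRange 0 (PySem.List.len p.2 + 1)).map
                  (fun k => PySem.List.slice p.2 none (some k))).foldl
                (fun dd q => dd.setdefault q p.1) dd)
            (PySem.Dict.empty : PySem.Dict (List String) Int)).get? (pvSplitSlash path)]).foldl
        (fun best j =>
          match j with
          | none => best
          | some jv => match best with
            | none => some jv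
            | some bv => if jv < bv then some jv else best) none) with
       | some i => (PySem.Set.update st.1 (PySem.List.pyGetD d.values i []), st.2)
       | none => (st.1, st.2 ++ [path])) := by
  rw [best_eq (d.keys.map pvOwnerItems) (pvSplitSlash path)]
  set comps := pvSplitSlash path with hcomps
  have hlen : (d.keys.map pvOwnerItems).length = d.keys.length := by simp
  have hfind : (d.keys.map pvOwnerItems).findIdx (fun x => pvZipMatch comps x)
      = d.keys.findIdx (fun k => pvZipMatch comps (pvOwnerItems k)) := by
    rw [List.findIdx_map]
    rfl
  set n := d.keys.findIdx (fun k => pvZipMatch comps (pvOwnerItems k)) with hn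
  rw [pvFindOwner_eq]
  unfold pvG
  rw [hfind, hlen, ← hn]
  by_cases h : n < d.keys.length
  · rw [List.getElem?_eq_getElem h, if_pos h]
    have hkeys : d.keys = d.items.map Prod.fst := rfl
    have hvals : d.values = d.items.map Prod.snd := rfl
    have hlen2 : n < d.items.length := by
      have : d.keys.length = d.items.length := by rw [hkeys]; simp
      omega
    have hvlen : n < d.values.length := by rw [hvals]; simpa using hlen2
    have hmem : (d.keys[n]'h, d.values[n]'hvlen) ∈ d.items := by
      have h1 : d.keys[n]'h = (d.items[n]'hlen2).1 := by
        simp [hkeys]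
      have h2 : d.values[n]'hvlen = (d.items[n]'hlen2).2 := by
        simp [hvals]
      rw [h1, h2]
      exact List.getElem_mem hlen2
    have hgetD : d.getD (d.keys[n]'h) [] = d.values[n]'hvlen :=
      PySem.Dict.getD_of_mem_items d hmem hnd []
    have hpy : PySem.List.pyGetD d.values ((n : Nat) : Int) [] = d.values[n]'hvlen := by
      rw [PySem.List.pyGetD_natCast, List.getD_eq_getElem?_getD,
        List.getElem?_eq_getElem hvlen]
      rfl
    simp only [hgetD, hpy]
  · rw [List.getElem?_eq_none (by omega), if_neg h]

-- ===== VERDICT (by name: the statement is the Claim_ definition above) =====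
theorem get_teams_owners_and_unowned_paths_spec : Claim_equal_get_teams_owners_and_unowned_paths := by
  intro diff_paths codeowners_paths _
  unfold Spec_get_teams_owners_and_unowned_paths
  unfold get_teams_owners_and_unowned_paths get_teams_owners_and_unowned_paths_alt
  apply PySem.List.foldl_congr_mem
  intro acc path _
  exact step_eq (PySem.Dict.ofList codeowners_paths)
    (PySem.Dict.nodup_keys_ofList codeowners_paths) acc path
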